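-- pv_equiv track=rewrite | github.com/takealittletime/CodingTest | SWEA/D3/1244. ［S／W 문제해결 응용］ 2일차 － 최대 상금/［S／W 문제해결 응용］ 2일차 － 최대 상금.py | bfs
-- ===== SOURCE A (Python) =====
-- from collections import deque
--
-- def bfs(N,K):
--   visited = set((N,0))
--   q = deque([(N,0)])
--   M = len(str(N))
--
--   answer = 0
--   while q:
--     n, k = q.popleft()
--
--     if k == K:
--       answer = max(answer,n)
--       continue
--
--     n = list(str(n))
--     for i in range(M-1):
--       for j in range(i+1, M):
--
--         if i == 0 and n[j] == '0':
--           continue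
--
--         n[i],n[j] = n[j],n[i]
--         nnum = int(''.join(n))
--         if (nnum,k+1) not in visited:
--           q.append((nnum,k+1))
--           visited.add((nnum,k+1))
--         n[i],n[j] = n[j],n[i]
--   return answer if answer else -1
-- ===== SOURCE B (Python) =====
-- def bfs(N, K):
--     # Fixpoint iteration with period-2 cycle detection instead of a BFS:
--     # the frontier sets S_t (values reachable in exactly t swaps) satisfy
--     # S_t == S_{t-2} eventually; once that happens, S_K is the one of the last
--     # two sets whose index has K's parity, so the loop stops early.
--     M = len(str(N))
--
--     def step(cur):
--         nxt = set()
--         for v in cur: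
--             d = list(str(v))
--             for i in range(M - 1):
--                 for j in range(i + 1, M):
--                     if i == 0 and d[j] == '0':
--                         continue
--                     d[i], d[j] = d[j], d[i]
--                     nxt.add(int(''.join(d)))
--                     d[i], d[j] = d[j], d[i]
--         return nxt
--
--     hist = [{N}]
--     while len(hist) <= K:
--         if len(hist) >= 3 and hist[-1] == hist[-3]:
--             break
--         hist.append(step(hist[-1]))
--     if len(hist) > K:
--         final = hist[K]
--     else:
--         final = hist[-1] if (K - len(hist) + 1) % 2 == 0 else hist[-2]
--     b = max(final) if final else None
--     return b if b else -1
-- ===== Notes on version B (the rewrite author's own statement) =====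
-- stated objective: faster
-- what changed: Replaces the BFS (deque of (value,depth) states, global visited set, running max) with fixpoint iteration over frontier sets with period-2 cycle detection: once the set of values reachable in exactly t swaps repeats (S_t == S_{t-2}), the answer set for K is chosen by parity and the loop stops, so only O(min(K, cycle length)) levels are ever computed instead of K.
-- outside the precondition, e.g. on bfs(-5, 0): A returns -1, B returns -5; on bfs(5, -1): A returns -1, B returns 5
import Mathlib
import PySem

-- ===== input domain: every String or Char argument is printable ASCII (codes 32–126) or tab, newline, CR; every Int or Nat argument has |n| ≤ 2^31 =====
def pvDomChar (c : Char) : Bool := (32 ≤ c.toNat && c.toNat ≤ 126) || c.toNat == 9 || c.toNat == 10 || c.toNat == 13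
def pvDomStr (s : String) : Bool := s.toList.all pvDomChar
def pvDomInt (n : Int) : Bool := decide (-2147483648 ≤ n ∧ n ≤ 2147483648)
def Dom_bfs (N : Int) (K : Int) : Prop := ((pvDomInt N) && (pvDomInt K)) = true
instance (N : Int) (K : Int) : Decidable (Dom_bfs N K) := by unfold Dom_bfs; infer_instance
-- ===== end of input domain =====

-- B replaces the deque BFS over (value,depth) tuples (global visited set, running max) with
-- fixpoint iteration: frontier sets with period-2 cycle detection and parity-based extraction,
-- stopping after O(min(K, stabilization time)) levels instead of K.


-- ===== PORT A =====
-- shared digit helpers, used verbatim by both ports: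
-- n[i],n[j] = n[j],n[i] on the digit list (exact for 0 ≤ i,j < ds.length; Pre_ rules out the inputs where Python would raise)
def pvSwap (ds : List Char) (i j : Int) : List Char :=
  PySem.List.pySetD (PySem.List.pySetD ds i (PySem.List.pyGetD ds j ' ')) j (PySem.List.pyGetD ds i ' ')
-- int(''.join(n)); inside Pre_ the digit string always parses (Python raises exactly where ofChars? is none; excluded by Pre_)
def pvNum (ds : List Char) : Int := (PySem.Int.ofChars? ds).getD 0

-- level machinery used only to COUNT the queue pops A performs (A's fuel below): the ordered
-- duplicate-free list of one-swap successors of v and the dedup step from one level to the next.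
def swapsB (M : Int) (v : Int) : List Int :=
  let ds := PySem.Int.toChars v
  (PySem.List.pyRange 0 (M - 1) 1).foldl (fun out i =>
    (PySem.List.pyRange (i + 1) M 1).foldl (fun out j =>
      if i == 0 && PySem.List.pyGetD ds j ' ' == '0' then out
      else out ++ [pvNum (pvSwap ds i j)]) out) []

def levelStepB (M : Int) (p : List Int × PySem.Set Int) (v : Int) : List Int × PySem.Set Int :=
  (swapsB M v).foldl (fun p w =>
    if PySem.Set.contains p.2 w then p else (p.1 ++ [w], PySem.Set.add p.2 w)) p

def nextLevelB (M : Int) (level : List Int) : List Int :=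
  (level.foldl (levelStepB M) ([], PySem.Set.empty)).1

-- exact number of queue pops A performs (one per state per explored level); used only as A's fuel
def pvFuel (M : Int) : Nat → List Int → Nat
  | 0, level => level.length
  | k + 1, level => if level = [] then 0 else level.length + pvFuel M k (nextLevelB M level)

-- A's inner double loop: push every allowed swap of n not yet in visited (state = (queue, visited))
def expandA (M : Int) (n k : Int) (st : List (Int × Int) × PySem.Set (Int × Int)) :
    List (Int × Int) × PySem.Set (Int × Int) :=
  let ds := PySem.Int.toChars n
  (PySem.List.pyRange 0 (M - 1) 1).foldl (fun st i =>
    (PySem.List.pyRange (i + 1) M 1).foldl (fun st j =>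
      if i == 0 && PySem.List.pyGetD ds j ' ' == '0' then st
      else
        let nnum := pvNum (pvSwap ds i j)
        if PySem.Set.contains st.2 (nnum, k + 1) then st
        else (st.1 ++ [(nnum, k + 1)], PySem.Set.add st.2 (nnum, k + 1))) st) st

-- A's while loop; fuel = one unit per pop, a pure totality guard (pvFuel counts the pops exactly,
-- proved below; outside Pre_ Python diverges or raises and nothing is claimed)
def loopA (M K : Int) : Nat → List (Int × Int) → PySem.Set (Int × Int) → Int → Option Int
  | 0, _, _, _ => none
  | fuel + 1, q, vis, answer =>
    match q with
    | [] => some answer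
    | (n, k) :: q' =>
      if k == K then loopA M K fuel q' vis (max answer n)
      else
        let st := expandA M n k (q', vis)
        loopA M K fuel st.1 st.2 answer

-- Python's `visited = set((N,0))` holds the INTS N and 0, which never compare equal to the
-- (value, depth) TUPLES the loop tests and inserts, so the tuple-set starts exactly empty.
def bfs (N : Int) (K : Int) : Int :=
  let M : Int := PySem.List.len (PySem.Int.toChars N)   -- M = len(str(N))
  let answer := (loopA M K (pvFuel M K.toNat [N] + 1) [(N, 0)] PySem.Set.empty 0).getD 0
  if answer == 0 then -1 else answer                     -- return answer if answer else -1

-- ===== PORT B =====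
-- step(cur) from Source B: the set of one-swap successors of a frontier set (set built in
-- iteration order; only consumed by set equality / emptiness / max, all order-insensitive)
def stepB (M : Int) (cur : PySem.Set Int) : PySem.Set Int :=
  cur.foldl (fun nxt v =>
    let ds := PySem.Int.toChars v
    (PySem.List.pyRange 0 (M - 1) 1).foldl (fun nxt i =>
      (PySem.List.pyRange (i + 1) M 1).foldl (fun nxt j =>
        if i == 0 && PySem.List.pyGetD ds j ' ' == '0' then nxt
        else PySem.Set.add nxt (pvNum (pvSwap ds i j))) nxt) nxt) PySem.Set.empty

-- Source B's while loop: extend hist until level K exists or the frontier repeats with period 2;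
-- fuel = one unit per append, a pure totality guard (the loop appends at most K times)
def loopB (M K : Int) : Nat → List (PySem.Set Int) → List (PySem.Set Int)
  | 0, hist => hist
  | f + 1, hist =>
    if PySem.List.len hist ≤ K then                     -- while len(hist) <= K
      if 3 ≤ PySem.List.len hist
          ∧ PySem.Set.equal (PySem.List.pyGetD hist (-1) PySem.Set.empty)
              (PySem.List.pyGetD hist (-3) PySem.Set.empty) = true
      then hist                                         -- if len>=3 and hist[-1]==hist[-3]: break
      else loopB M K f
        (hist ++ [stepB M (PySem.List.pyGetD hist (-1) PySem.Set.empty)])  -- hist.append(step(hist[-1]))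
    else hist

def bfs_alt (N : Int) (K : Int) : Int :=
  let M : Int := PySem.List.len (PySem.Int.toChars N)   -- M = len(str(N))
  let hist := loopB M K K.toNat [PySem.Set.ofList [N]]  -- hist = [{N}]; while ...
  let final :=
    if K < PySem.List.len hist then                     -- if len(hist) > K: final = hist[K]
      PySem.List.pyGetD hist K PySem.Set.empty
    else if PySem.Int.mod (K - PySem.List.len hist + 1) 2 == 0 then
      PySem.List.pyGetD hist (-1) PySem.Set.empty       -- final = hist[-1] if (K-len(hist)+1)%2==0
    else PySem.List.pyGetD hist (-2) PySem.Set.empty    --         else hist[-2]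
  let b : Option Int :=
    if final = [] then none else PySem.List.max? final (fun x => x)  -- b = max(final) if final else None
  match b with                                          -- return b if b else -1
  | none => -1
  | some m => if m == 0 then -1 else m

-- ===== PRECONDITION & SPEC =====
-- Pre_ restricts to the task's natural domain — a nonnegative number and a nonnegative swap
-- count: for N < 0 every expansion raises ValueError (int of a string with an inner '-'), and
-- for K < 0 the target depth is never reached, so A diverges on N ≥ 10 and only falls through
-- to -1 on the degenerate corners (single-digit N, or K = 0 with N < 0).
def Pre_bfs (N : Int) (K : Int) : Prop := 0 ≤ N ∧ 0 ≤ K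
instance (N : Int) (K : Int) : Decidable (Pre_bfs N K) := by unfold Pre_bfs; infer_instance
def pvWitness_bfs : Int × Int := (10, 1)

def Spec_bfs (N : Int) (K : Int) (out : Int) : Prop := out = bfs_alt N K
instance (N : Int) (K : Int) (out : Int) : Decidable (Spec_bfs N K out) := by unfold Spec_bfs; infer_instance

-- ===== CLAIM (what is proved, stated in full; the proofs are below) =====
def Claim_equal_bfs : Prop := ∀ (N : Int) (K : Int), Dom_bfs N K → Pre_bfs N K → Spec_bfs N K (bfs N K)

-- ===== LEMMAS AND PROOFS =====

-- proof-side helpers ---------------------------------------------------------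

-- `for _ in range(K): level = nextLevel level` with A's empty-queue cut-off: the set of values
-- A's BFS holds at each depth (proof-side only; A's fuel is counted against the same levels).
def iterLevelsB (M : Int) : Nat → List Int → List Int
  | 0, level => level
  | k + 1, level => if level = [] then level else iterLevelsB M k (nextLevelB M level)

-- values reachable from v in exactly j allowed swaps
def pvReach (M : Int) : Nat → Int → Int → Prop
  | 0, v, w => w = v
  | j + 1, v, w => ∃ u ∈ swapsB M v, pvReach M j u w

-- the pure level sets Source B's hist holds: pvLev t = values reachable in exactly t swaps
def pvLev (M N : Int) : Nat → PySem.Set Int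
  | 0 => PySem.Set.ofList [N]
  | t + 1 => stepB M (pvLev M N t)

-- generic loop shapes --------------------------------------------------------

/-- A fold that appends a block per element pulls its accumulator out front. -/
theorem pvFoldlAccAppend {α β : Type} (g : List β → α → List β)
    (h : ∀ acc x, g acc x = acc ++ g [] x) :
    ∀ (l : List α) (acc : List β), l.foldl g acc = acc ++ l.foldl g [] := by
  intro l
  induction l with
  | nil => intro acc; simp
  | cons x t ih =>
    intro acc
    simp only [List.foldl_cons]
    rw [ih (g acc x), ih (g [] x), h acc x, List.append_assoc]

/-- Folding a guarded "emit one element" body equals folding the pushes over the emitted list. -/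
theorem pvFoldlFilterEmit {σ α β : Type} (push : σ → β → σ) (c : α → Bool) (e : α → β) :
    ∀ (l : List α) (s : σ),
      l.foldl (fun s x => if c x then s else push s (e x)) s
        = (l.foldl (fun a x => if c x then a else a ++ [e x]) []).foldl push s := by
  have hb : ∀ (acc : List β) (y : α),
      (fun a x => if c x then a else a ++ [e x]) acc y
        = acc ++ (fun a x => if c x then a else a ++ [e x]) [] y := by
    intro acc y; by_cases hy : c y <;> simp [hy]
  intro l
  induction l with
  | nil => intro s; simp
  | cons x t ih =>
    intro s
    simp only [List.foldl_cons]
    by_cases h : c x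
    · simp only [h, if_true]
      exact ih s
    · simp only [h, Bool.false_eq_true, if_false]
      rw [ih (push s (e x)),
        pvFoldlAccAppend (fun a x => if c x then a else a ++ [e x]) hb t ([] ++ [e x]),
        List.foldl_append]
      simp

/-- The guarded i<j double loop over digit swaps, for ANY push, is the push-fold of swapsB. -/
theorem pvDoubleFoldPush {σ : Type} (M v : Int) (push : σ → Int → σ) (st : σ) :
    (PySem.List.pyRange 0 (M - 1) 1).foldl (fun s i =>
      (PySem.List.pyRange (i + 1) M 1).foldl (fun s j =>
        if i == 0 && PySem.List.pyGetD (PySem.Int.toChars v) j ' ' == '0' then s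
        else push s (pvNum (pvSwap (PySem.Int.toChars v) i j))) s) st
      = (swapsB M v).foldl push st := by
  unfold swapsB
  set ds := PySem.Int.toChars v with hds
  have inner : ∀ (i : Int) (s : σ),
      (PySem.List.pyRange (i + 1) M 1).foldl (fun s j =>
          if i == 0 && PySem.List.pyGetD ds j ' ' == '0' then s
          else push s (pvNum (pvSwap ds i j))) s
        = ((PySem.List.pyRange (i + 1) M 1).foldl (fun out j =>
            if i == 0 && PySem.List.pyGetD ds j ' ' == '0' then out
            else out ++ [pvNum (pvSwap ds i j)]) []).foldl push s := by
    intro i s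
    exact pvFoldlFilterEmit push _ _ _ s
  generalize (PySem.List.pyRange 0 (M - 1) 1) = is
  induction is generalizing st with
  | nil => simp
  | cons i t ih =>
    simp only [List.foldl_cons]
    rw [inner i st, ih]
    have hpull := pvFoldlAccAppend
      (fun out i => (PySem.List.pyRange (i + 1) M 1).foldl (fun out j =>
          if i == 0 && PySem.List.pyGetD ds j ' ' == '0' then out
          else out ++ [pvNum (pvSwap ds i j)]) out)
      (fun acc x => by
        exact pvFoldlAccAppend _
          (fun acc2 y => by by_cases hy : (x == 0 && PySem.List.pyGetD ds y ' ' == '0') <;> simp [hy]) _ acc)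
      t ((PySem.List.pyRange (i + 1) M 1).foldl (fun out j =>
          if i == 0 && PySem.List.pyGetD ds j ' ' == '0' then out
          else out ++ [pvNum (pvSwap ds i j)]) [])
    rw [hpull, List.foldl_append]

/-- A's inner double loop is the push-fold of its emitted swap list. -/
theorem pvExpandEqFold (M n k : Int) (st : List (Int × Int) × PySem.Set (Int × Int)) :
    expandA M n k st
      = (swapsB M n).foldl (fun st w =>
          if PySem.Set.contains st.2 (w, k + 1) then st
          else (st.1 ++ [(w, k + 1)], PySem.Set.add st.2 (w, k + 1))) st := by
  unfold expandA
  dsimp only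
  exact pvDoubleFoldPush M n (fun st w =>
    if PySem.Set.contains st.2 (w, k + 1) then st
    else (st.1 ++ [(w, k + 1)], PySem.Set.add st.2 (w, k + 1))) st

-- visited-set invariant ------------------------------------------------------

/-- The visited set agrees with the dedup seen set on depth k+1 and is empty above it. -/
def pvVisInv (vis : PySem.Set (Int × Int)) (k : Int) (seen : PySem.Set Int) : Prop :=
  (∀ w : Int, (w, k + 1) ∈ vis ↔ w ∈ seen) ∧ (∀ (w d : Int), k + 1 < d → (w, d) ∉ vis)

/-- Pushing one candidate list keeps A's (queue, visited) in lock-step with (next, seen). -/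
theorem pvPushFold (k : Int) :
    ∀ (ws : List Int) (qpre : List (Int × Int)) (nxt : List Int)
      (vis : PySem.Set (Int × Int)) (seen : PySem.Set Int),
      pvVisInv vis k seen →
      (ws.foldl (fun st w =>
          if PySem.Set.contains st.2 (w, k + 1) then st
          else (st.1 ++ [(w, k + 1)], PySem.Set.add st.2 (w, k + 1)))
        (qpre ++ nxt.map (fun w => (w, k + 1)), vis)).1
          = qpre ++ ((ws.foldl (fun p w =>
              if PySem.Set.contains p.2 w then p
              else (p.1 ++ [w], PySem.Set.add p.2 w)) (nxt, seen)).1).map (fun w => (w, k + 1))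
      ∧ pvVisInv (ws.foldl (fun st w =>
          if PySem.Set.contains st.2 (w, k + 1) then st
          else (st.1 ++ [(w, k + 1)], PySem.Set.add st.2 (w, k + 1)))
        (qpre ++ nxt.map (fun w => (w, k + 1)), vis)).2 k
        (ws.foldl (fun p w =>
            if PySem.Set.contains p.2 w then p
            else (p.1 ++ [w], PySem.Set.add p.2 w)) (nxt, seen)).2 := by
  intro ws
  induction ws with
  | nil => intro qpre nxt vis seen hinv; exact ⟨rfl, hinv⟩
  | cons w t ih =>
    intro qpre nxt vis seen hinv
    simp only [List.foldl_cons]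
    have hmem : PySem.Set.contains vis (w, k + 1) = PySem.Set.contains seen w := by
      by_cases h : w ∈ seen
      · rw [(PySem.Set.contains_iff vis (w, k + 1)).mpr ((hinv.1 w).mpr h),
            (PySem.Set.contains_iff seen w).mpr h]
      · have h1 : (w, k + 1) ∉ vis := fun hc => h ((hinv.1 w).mp hc)
        rw [Bool.eq_false_iff.mpr (fun hc => h1 ((PySem.Set.contains_iff vis (w, k + 1)).mp hc)),
            Bool.eq_false_iff.mpr (fun hc => h ((PySem.Set.contains_iff seen w).mp hc))]
    rw [hmem]
    by_cases h : PySem.Set.contains seen w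
    · simp only [h, if_true]
      exact ih qpre nxt vis seen hinv
    · simp only [h]
      have hinv' : pvVisInv (PySem.Set.add vis (w, k + 1)) k (PySem.Set.add seen w) := by
        constructor
        · intro w'
          rw [PySem.Set.mem_add, PySem.Set.mem_add, hinv.1 w']
          constructor
          · rintro (h1 | h1)
            · exact Or.inl h1
            · exact Or.inr (by injection h1 with h2 h3)
          · rintro (h1 | h1)
            · exact Or.inl h1
            · subst h1; exact Or.inr rfl
        · intro w' d hd hc
          rcases (PySem.Set.mem_add _ _ _).mp hc with h1 | h1
          · exact hinv.2 w' d hd h1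
          · injection h1 with h2 h3; omega
      have := ih qpre (nxt ++ [w]) (PySem.Set.add vis (w, k + 1)) (PySem.Set.add seen w) hinv'
      simpa [List.map_append, List.append_assoc] using this

-- one full level -------------------------------------------------------------

/-- Processing a whole level: |rest| pops turn the depth-k remainder plus the partial
next level into the completed next level, preserving the invariant. -/
theorem pvLevel (M K k : Int) (hk : (k == K) = false) :
    ∀ (rest : List Int) (f : Nat) (nxt : List Int)
      (vis : PySem.Set (Int × Int)) (seen : PySem.Set Int) (ans : Int),
      pvVisInv vis k seen →
      ∃ vis', loopA M K (f + rest.length)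
            (rest.map (fun v => (v, k)) ++ nxt.map (fun w => (w, k + 1))) vis ans
          = loopA M K f
            (((rest.foldl (levelStepB M) (nxt, seen)).1).map (fun w => (w, k + 1))) vis' ans
        ∧ pvVisInv vis' k (rest.foldl (levelStepB M) (nxt, seen)).2 := by
  intro rest
  induction rest with
  | nil =>
    intro f nxt vis seen ans hinv
    exact ⟨vis, by simp, hinv⟩
  | cons v t ih =>
    intro f nxt vis seen ans hinv
    have hfuel : f + (v :: t).length = (f + t.length) + 1 := by simp; omega
    rw [hfuel]
    simp only [List.map_cons, List.cons_append, loopA, hk]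
    rw [pvExpandEqFold]
    have hpf := pvPushFold k (swapsB M v) (t.map (fun v => (v, k))) nxt vis seen hinv
    set stA := (swapsB M v).foldl (fun st w =>
        if PySem.Set.contains st.2 (w, k + 1) then st
        else (st.1 ++ [(w, k + 1)], PySem.Set.add st.2 (w, k + 1)))
      (t.map (fun v => (v, k)) ++ nxt.map (fun w => (w, k + 1)), vis) with hstA
    obtain ⟨hq, hinv2⟩ := hpf
    have hstep : levelStepB M (nxt, seen) v
        = (swapsB M v).foldl (fun p w =>
            if PySem.Set.contains p.2 w then p else (p.1 ++ [w], PySem.Set.add p.2 w)) (nxt, seen) := rfl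
    have := ih (f := f) (nxt := (levelStepB M (nxt, seen) v).1)
      (vis := stA.2) (seen := (levelStepB M (nxt, seen) v).2) (ans := ans)
      (by rw [hstep]; exact hinv2)
    obtain ⟨vis', heq, hinv3⟩ := this
    refine ⟨vis', ?_, ?_⟩
    · rw [show stA.1 = t.map (fun v => (v, k)) ++ ((levelStepB M (nxt, seen) v).1).map (fun w => (w, k + 1)) by
          rw [hstep]; exact hq]
      rw [heq]
      simp [List.foldl_cons]
    · simpa [List.foldl_cons] using hinv3

/-- The last level (depth K): each pop folds the running max. -/
theorem pvFinalLevel (M K : Int) :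
    ∀ (l : List Int) (f : Nat) (vis : PySem.Set (Int × Int)) (ans : Int),
      loopA M K (f + l.length + 1) (l.map (fun v => (v, K))) vis ans
        = some (l.foldl max ans) := by
  intro l
  induction l with
  | nil => intro f vis ans; simp [loopA]
  | cons v t ih =>
    intro f vis ans
    have hfuel : f + (v :: t).length + 1 = (f + t.length + 1) + 1 := by simp; omega
    rw [hfuel]
    simp only [List.map_cons, loopA, beq_self_eq_true, if_true]
    exact ih f vis (max ans v)

/-- All depths strictly above k are absent from the visited set. -/
def pvHighEmpty (vis : PySem.Set (Int × Int)) (k : Int) : Prop :=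
  ∀ (w d : Int), k < d → (w, d) ∉ vis

/-- Main A-side correspondence: starting j levels below K, the loop returns the max (over the
running accumulator) of the j-fold iterated level, consuming exactly pvFuel pops. -/
theorem pvOuter (M K : Int) :
    ∀ (j : Nat) (l : List Int) (f : Nat) (vis : PySem.Set (Int × Int)) (ans : Int),
      pvHighEmpty vis (K - j) →
      loopA M K (f + pvFuel M j l + 1) (l.map (fun v => (v, K - j))) vis ans
        = some ((iterLevelsB M j l).foldl max ans) := by
  intro j
  induction j with
  | zero =>
    intro l f vis ans _
    simpa [pvFuel, iterLevelsB] using pvFinalLevel M K l f vis ans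
  | succ j ih =>
    intro l f vis ans hhigh
    by_cases hl : l = []
    · subst hl
      simp [iterLevelsB, loopA]
    · have hk : ((K - (j + 1 : Nat) : Int) == K) = false := by
        apply beq_eq_false_iff_ne.mpr
        push_cast
        omega
      have hinv : pvVisInv vis (K - (j + 1 : Nat)) PySem.Set.empty := by
        constructor
        · intro w
          constructor
          · intro h
            exact absurd h (hhigh w _ (by push_cast; omega))
          · intro h; cases h
        · intro w d hd
          exact hhigh w d (by push_cast at hd ⊢; omega)
      have hfuel : f + pvFuel M (j + 1) l + 1
          = (f + pvFuel M j (nextLevelB M l) + 1) + l.length := by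
        simp [pvFuel, hl]; omega
      have hlev := pvLevel M K (K - (j + 1 : Nat)) hk l
        (f + pvFuel M j (nextLevelB M l) + 1) [] vis PySem.Set.empty ans hinv
      obtain ⟨vis', heq, hinv2⟩ := hlev
      rw [hfuel]
      have hq0 : l.map (fun v => (v, (K - (j + 1 : Nat) : Int)))
          = l.map (fun v => (v, (K - (j + 1 : Nat) : Int))) ++ ([] : List Int).map (fun w => (w, (K - (j + 1 : Nat) : Int) + 1)) := by
        simp
      rw [hq0]
      rw [heq]
      have hnl : (l.foldl (levelStepB M) (([] : List Int), PySem.Set.empty)).1 = nextLevelB M l := rfl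
      rw [hnl]
      have hdepth : (K - (j + 1 : Nat) : Int) + 1 = K - (j : Nat) := by push_cast; omega
      rw [hdepth]
      have hhigh' : pvHighEmpty vis' (K - (j : Nat)) := by
        intro w d hd
        have := hinv2.2 w d (by rw [hdepth]; exact hd)
        exact this
      have := ih (nextLevelB M l) f vis' ans hhigh'
      rw [this]
      simp [iterLevelsB, hl]

-- membership: the iterated levels hold exactly the reachable values ----------

theorem pvDedupFold :
    ∀ (ws lst : List Int) (seen : PySem.Set Int),
      (∀ x, x ∈ seen ↔ x ∈ lst) →
      (∀ x, x ∈ (ws.foldl (fun p w =>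
          if PySem.Set.contains p.2 w then p
          else (p.1 ++ [w], PySem.Set.add p.2 w)) (lst, seen)).1 ↔ x ∈ lst ∨ x ∈ ws)
      ∧ (∀ x, x ∈ (ws.foldl (fun p w =>
          if PySem.Set.contains p.2 w then p
          else (p.1 ++ [w], PySem.Set.add p.2 w)) (lst, seen)).2 ↔ x ∈ (ws.foldl (fun p w =>
          if PySem.Set.contains p.2 w then p
          else (p.1 ++ [w], PySem.Set.add p.2 w)) (lst, seen)).1) := by
  intro ws
  induction ws with
  | nil =>
    intro lst seen h
    exact ⟨by simp, h⟩
  | cons w t ih =>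
    intro lst seen h
    simp only [List.foldl_cons]
    by_cases hc : PySem.Set.contains seen w
    · have hw : w ∈ lst := (h w).mp ((PySem.Set.contains_iff _ _).mp hc)
      simp only [hc, if_true]
      obtain ⟨m1, m2⟩ := ih lst seen h
      refine ⟨?_, m2⟩
      intro x
      rw [m1 x, List.mem_cons]
      constructor
      · rintro (h1 | h1)
        · exact Or.inl h1
        · exact Or.inr (Or.inr h1)
      · rintro (h1 | h1 | h1)
        · exact Or.inl h1
        · exact Or.inl (h1 ▸ hw)
        · exact Or.inr h1
    · simp only [hc, Bool.false_eq_true, if_false]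
      have h' : ∀ x, x ∈ PySem.Set.add seen w ↔ x ∈ lst ++ [w] := by
        intro x
        rw [PySem.Set.mem_add, h x, List.mem_append, List.mem_singleton]
      obtain ⟨m1, m2⟩ := ih (lst ++ [w]) (PySem.Set.add seen w) h'
      refine ⟨?_, m2⟩
      intro x
      rw [m1 x, List.mem_append, List.mem_singleton, List.mem_cons]
      constructor
      · rintro ((h1 | h1) | h1)
        · exact Or.inl h1
        · exact Or.inr (Or.inl h1)
        · exact Or.inr (Or.inr h1)
      · rintro (h1 | h1 | h1)
        · exact Or.inl (Or.inl h1)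
        · exact Or.inl (Or.inr h1)
        · exact Or.inr h1

theorem pvMemNextLevel (M : Int) :
    ∀ (L lst : List Int) (seen : PySem.Set Int),
      (∀ x, x ∈ seen ↔ x ∈ lst) →
      (∀ x, x ∈ (L.foldl (levelStepB M) (lst, seen)).1 ↔ x ∈ lst ∨ ∃ v ∈ L, x ∈ swapsB M v)
      ∧ (∀ x, x ∈ (L.foldl (levelStepB M) (lst, seen)).2 ↔ x ∈ (L.foldl (levelStepB M) (lst, seen)).1) := by
  intro L
  induction L with
  | nil =>
    intro lst seen h
    refine ⟨?_, h⟩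
    intro x
    simp
  | cons v t ih =>
    intro lst seen h
    simp only [List.foldl_cons]
    obtain ⟨d1, d2⟩ := pvDedupFold (swapsB M v) lst seen h
    have hpair : levelStepB M (lst, seen) v
        = ((levelStepB M (lst, seen) v).1, (levelStepB M (lst, seen) v).2) := rfl
    rw [hpair]
    obtain ⟨m1, m2⟩ := ih (levelStepB M (lst, seen) v).1 (levelStepB M (lst, seen) v).2
      (fun x => d2 x)
    refine ⟨?_, m2⟩
    intro x
    rw [m1 x]
    have hd1 := d1 x
    constructor
    · rintro (h1 | ⟨u, hu, h1⟩)
      · rcases hd1.mp h1 with h2 | h2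
        · exact Or.inl h2
        · exact Or.inr ⟨v, List.mem_cons_self, h2⟩
      · exact Or.inr ⟨u, List.mem_cons_of_mem _ hu, h1⟩
    · rintro (h1 | ⟨u, hu, h1⟩)
      · exact Or.inl (hd1.mpr (Or.inl h1))
      · rcases List.mem_cons.mp hu with h2 | h2
        · exact Or.inl (hd1.mpr (Or.inr (h2 ▸ h1)))
        · exact Or.inr ⟨u, h2, h1⟩

theorem pvMemIter (M : Int) :
    ∀ (j : Nat) (L : List Int) (w : Int),
      w ∈ iterLevelsB M j L ↔ ∃ v ∈ L, pvReach M j v w := by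
  intro j
  induction j with
  | zero =>
    intro L w
    constructor
    · intro h; exact ⟨w, h, rfl⟩
    · rintro ⟨v, hv, he⟩; exact (he : w = v) ▸ hv
  | succ j ih =>
    intro L w
    by_cases hL : L = []
    · subst hL
      simp [iterLevelsB]
    · rw [show iterLevelsB M (j + 1) L = iterLevelsB M j (nextLevelB M L) by
        simp [iterLevelsB, hL]]
      rw [ih]
      have hmem := (pvMemNextLevel M L [] PySem.Set.empty
        (by intro x; constructor <;> (intro h; cases h))).1
      have hnl : (L.foldl (levelStepB M) (([] : List Int), PySem.Set.empty)).1 = nextLevelB M L := rfl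
      constructor
      · rintro ⟨u, hu, hr⟩
        rw [← hnl] at hu
        rcases (hmem u).mp hu with h1 | ⟨v, hv, h1⟩
        · cases h1
        · exact ⟨v, hv, (⟨u, h1, hr⟩ : ∃ u ∈ swapsB M v, pvReach M j u w)⟩
      · rintro ⟨v, hv, hr⟩
        obtain ⟨u, hu, hr'⟩ := (hr : ∃ u ∈ swapsB M v, pvReach M j u w)
        refine ⟨u, ?_, hr'⟩
        rw [← hnl]
        exact (hmem u).mpr (Or.inr ⟨v, hv, hu⟩)

-- nonnegativity of everything reachable from a nonnegative start -------------

theorem pvMemPySetD (xs : List Char) (i : Int) (c x : Char)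
    (h : x ∈ PySem.List.pySetD xs i c) : x ∈ xs ∨ x = c := by
  unfold PySem.List.pySetD PySem.List.pySet? at h
  cases hk : PySem.List.pyIdx? xs.length i with
  | none => rw [hk] at h; simp at h; exact Or.inl h
  | some k => rw [hk] at h; simp at h; exact List.mem_or_eq_of_mem_set h

theorem pvGetDMemOr (xs : List Char) (j : Int) (d : Char) :
    PySem.List.pyGetD xs j d ∈ xs ∨ PySem.List.pyGetD xs j d = d := by
  unfold PySem.List.pyGetD PySem.List.pyGet?
  cases hk : PySem.List.pyIdx? xs.length j with
  | none => simp
  | some k =>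
    simp only [Option.bind]
    cases hg : xs[k]? with
    | none => simp
    | some a =>
      simp only [Option.getD_some]
      refine Or.inl ?_
      simp [List.getElem?_eq_some_iff] at hg
      obtain ⟨h1, h2⟩ := hg
      subst h2
      exact List.getElem_mem h1

theorem pvToCharsDigit (v : Int) (hv : 0 ≤ v) :
    ∀ c ∈ PySem.Int.toChars v, c.isDigit = true := by
  intro c hc
  unfold PySem.Int.toChars at hc
  rw [if_neg (by omega)] at hc
  exact Nat.isDigit_of_mem_toDigits (by norm_num) (by norm_num) hc

theorem pvOfCharsNonneg (cs : List Char) (h : '-' ∉ cs) (z : Int)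
    (hz : PySem.Int.ofChars? cs = some z) : 0 ≤ z := by
  unfold PySem.Int.ofChars? at hz
  dsimp only at hz
  split at hz
  · next ds heq =>
    exfalso
    apply h
    have hm : '-' ∈ (List.dropWhile PySem.Int.isIntSpace (List.dropWhile PySem.Int.isIntSpace cs).reverse).reverse := by
      rw [heq]; exact List.mem_cons_self
    rw [List.mem_reverse] at hm
    have h1 := (List.dropWhile_sublist (l := (List.dropWhile PySem.Int.isIntSpace cs).reverse) PySem.Int.isIntSpace).mem hm
    rw [List.mem_reverse] at h1
    exact (List.dropWhile_sublist (l := cs) PySem.Int.isIntSpace).mem h1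
  · next ds heq =>
    simp only [Option.map_eq_some_iff] at hz
    obtain ⟨n, hn, rfl⟩ := hz
    simp only [bind, Option.bind] at hn
    split at hn
    · exact absurd hn (by simp)
    · next a ha =>
      simp only [pure, Option.some.injEq] at hn
      subst hn; positivity
  · next ds h1 h2 =>
    simp only [Option.map_eq_some_iff] at hz
    obtain ⟨n, hn, rfl⟩ := hz
    simp only [bind, Option.bind] at hn
    split at hn
    · exact absurd hn (by simp)
    · next a ha =>
      simp only [pure, Option.some.injEq] at hn
      subst hn; positivity

theorem pvNumSwapNonneg (v : Int) (hv : 0 ≤ v) (i j : Int) :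
    0 ≤ pvNum (pvSwap (PySem.Int.toChars v) i j) := by
  unfold pvNum
  cases hz : PySem.Int.ofChars? (pvSwap (PySem.Int.toChars v) i j) with
  | none => simp
  | some z =>
    simp only [Option.getD_some]
    refine pvOfCharsNonneg _ ?_ z hz
    intro hm
    have hdig : ∀ c ∈ PySem.Int.toChars v, c ≠ '-' := by
      intro c hc he
      have := pvToCharsDigit v hv c hc
      rw [he] at this
      exact absurd this (by decide)
    have hget : ∀ (a : Int), PySem.List.pyGetD (PySem.Int.toChars v) a ' ' ≠ '-' := by
      intro a he
      rcases pvGetDMemOr (PySem.Int.toChars v) a ' ' with h3 | h3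
      · exact hdig _ h3 he
      · rw [he] at h3; exact absurd h3 (by decide)
    unfold pvSwap at hm
    rcases pvMemPySetD _ _ _ _ hm with h1 | h1
    · rcases pvMemPySetD _ _ _ _ h1 with h2 | h2
      · exact hdig _ h2 rfl
      · exact hget j h2.symm
    · exact hget i h1.symm

theorem pvFoldlAllP {α : Type} (P : Int → Prop) :
    ∀ (l : List α) (body : List Int → α → List Int) (acc : List Int),
      (∀ a x w, w ∈ body a x → w ∈ a ∨ P w) → (∀ w ∈ acc, P w) →
      ∀ w ∈ l.foldl body acc, P w := by
  intro l
  induction l with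
  | nil => intro body acc hb ha w hw; exact ha w hw
  | cons x t ih =>
    intro body acc hb ha w hw
    refine ih body (body acc x) hb ?_ w hw
    intro w' hw'
    rcases hb acc x w' hw' with h | h
    · exact ha w' h
    · exact h

theorem pvSwapsNonneg (M v : Int) (hv : 0 ≤ v) : ∀ w ∈ swapsB M v, 0 ≤ w := by
  unfold swapsB
  dsimp only
  refine pvFoldlAllP (fun w => 0 ≤ w) _ _ _ ?_ (by intro w hw; cases hw)
  intro a i w hw
  refine pvFoldlAllP (fun w => w ∈ a ∨ 0 ≤ w) _ _ _ ?_ (by intro w' hw'; exact Or.inl hw') w hw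
  intro a' j w' hw'
  by_cases hg : (i == 0 && PySem.List.pyGetD (PySem.Int.toChars v) j ' ' == '0')
  · rw [if_pos hg] at hw'; exact Or.inl hw'
  · rw [if_neg hg] at hw'
    rcases List.mem_append.mp hw' with h | h
    · exact Or.inl h
    · rw [List.mem_singleton] at h
      subst h
      exact Or.inr (Or.inr (pvNumSwapNonneg v hv i j))

theorem pvReachNonneg (M : Int) :
    ∀ (j : Nat) (v w : Int), 0 ≤ v → pvReach M j v w → 0 ≤ w := by
  intro j
  induction j with
  | zero => intro v w hv h; rw [show pvReach M 0 v w = (w = v) from rfl] at h; omega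
  | succ j ih =>
    intro v w hv h
    obtain ⟨u, hu, hr⟩ := h
    exact ih u w (pvSwapsNonneg M v hv u hu) hr

-- B side: the level sets hold exactly the reachable values -------------------

theorem pvMemFoldAdd (ws : List Int) :
    ∀ (s : PySem.Set Int) (x : Int), x ∈ ws.foldl PySem.Set.add s ↔ x ∈ s ∨ x ∈ ws := by
  intro s x
  have h := PySem.Set.mem_foldl_add ws (fun b => b) s x
  simp only at h
  rw [show ws.foldl PySem.Set.add s = ws.foldl (fun s b => PySem.Set.add s b) s from rfl]
  rw [h]
  constructor
  · rintro (h1 | ⟨b, hb, rfl⟩)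
    · exact Or.inl h1
    · exact Or.inr hb
  · rintro (h1 | h1)
    · exact Or.inl h1
    · exact Or.inr ⟨x, h1, rfl⟩

theorem pvMemStep (M : Int) (cur : PySem.Set Int) (x : Int) :
    x ∈ stepB M cur ↔ ∃ v ∈ cur, x ∈ swapsB M v := by
  unfold stepB
  have hbody : (fun (nxt : PySem.Set Int) (v : Int) =>
      let ds := PySem.Int.toChars v
      (PySem.List.pyRange 0 (M - 1) 1).foldl (fun nxt i =>
        (PySem.List.pyRange (i + 1) M 1).foldl (fun nxt j =>
          if i == 0 && PySem.List.pyGetD ds j ' ' == '0' then nxt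
          else PySem.Set.add nxt (pvNum (pvSwap ds i j))) nxt) nxt)
      = fun (nxt : PySem.Set Int) (v : Int) => (swapsB M v).foldl PySem.Set.add nxt := by
    funext nxt v
    exact pvDoubleFoldPush M v PySem.Set.add nxt
  rw [hbody]
  have haux : ∀ (L : List Int) (s : PySem.Set Int),
      x ∈ L.foldl (fun nxt v => (swapsB M v).foldl PySem.Set.add nxt) s
        ↔ x ∈ s ∨ ∃ v ∈ L, x ∈ swapsB M v := by
    intro L
    induction L with
    | nil => intro s; simp
    | cons v t ih =>
      intro s
      simp only [List.foldl_cons]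
      rw [ih, pvMemFoldAdd]
      constructor
      · rintro ((h1 | h1) | ⟨u, hu, h1⟩)
        · exact Or.inl h1
        · exact Or.inr ⟨v, List.mem_cons_self, h1⟩
        · exact Or.inr ⟨u, List.mem_cons_of_mem _ hu, h1⟩
      · rintro (h1 | ⟨u, hu, h1⟩)
        · exact Or.inl (Or.inl h1)
        · rcases List.mem_cons.mp hu with h2 | h2
          · exact Or.inl (Or.inr (h2 ▸ h1))
          · exact Or.inr ⟨u, h2, h1⟩
  rw [haux]
  simp

/-- snoc form of reachability: peel the LAST swap instead of the first. -/
theorem pvReachSucc (M : Int) :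
    ∀ (t : Nat) (v x : Int),
      pvReach M (t + 1) v x ↔ ∃ u, pvReach M t v u ∧ x ∈ swapsB M u := by
  intro t
  induction t with
  | zero =>
    intro v x
    constructor
    · rintro ⟨u, hu, hr⟩
      exact ⟨v, rfl, (hr : x = u) ▸ hu⟩
    · rintro ⟨u, hu, hx⟩
      exact ⟨x, (hu : u = v) ▸ hx, rfl⟩
  | succ t ih =>
    intro v x
    constructor
    · rintro ⟨w, hw, hr⟩
      obtain ⟨u, hu, hx⟩ := (ih w x).mp hr
      exact ⟨u, (⟨w, hw, hu⟩ : ∃ w ∈ swapsB M v, pvReach M t w u), hx⟩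
    · rintro ⟨u, hu, hx⟩
      obtain ⟨w, hw, hr⟩ := (hu : ∃ w ∈ swapsB M v, pvReach M t w u)
      exact ⟨w, hw, (ih w x).mpr ⟨u, hr, hx⟩⟩

theorem pvMemLev (M N : Int) :
    ∀ (t : Nat) (x : Int), x ∈ pvLev M N t ↔ pvReach M t N x := by
  intro t
  induction t with
  | zero =>
    intro x
    show x ∈ PySem.Set.ofList [N] ↔ _
    rw [PySem.Set.mem_ofList, List.mem_singleton]
    exact Iff.rfl
  | succ t ih =>
    intro x
    show x ∈ stepB M (pvLev M N t) ↔ _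
    rw [pvMemStep, pvReachSucc]
    constructor
    · rintro ⟨v, hv, hx⟩
      exact ⟨v, (ih v).mp hv, hx⟩
    · rintro ⟨v, hv, hx⟩
      exact ⟨v, (ih v).mpr hv, hx⟩

-- period-2 stabilization propagates to every later level of the same parity --

theorem pvStabStep (M N : Int) (a b : Nat)
    (h : ∀ x, pvReach M a N x ↔ pvReach M b N x) :
    ∀ x, pvReach M (a + 1) N x ↔ pvReach M (b + 1) N x := by
  intro x
  rw [pvReachSucc, pvReachSucc]
  constructor
  · rintro ⟨u, hu, hx⟩; exact ⟨u, (h u).mp hu, hx⟩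
  · rintro ⟨u, hu, hx⟩; exact ⟨u, (h u).mpr hu, hx⟩

theorem pvStabShift (M N : Int) (a : Nat)
    (h : ∀ x, pvReach M (a + 2) N x ↔ pvReach M a N x) :
    ∀ (k : Nat) (x : Int), pvReach M (a + k + 2) N x ↔ pvReach M (a + k) N x := by
  intro k
  induction k with
  | zero => exact h
  | succ k ih =>
    have := pvStabStep M N (a + k + 2) (a + k) ih
    intro x
    rw [show a + (k + 1) + 2 = a + k + 2 + 1 by ring, show a + (k + 1) = a + k + 1 by ring]
    exact this x

theorem pvStabMany (M N : Int) (a : Nat)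
    (h : ∀ x, pvReach M (a + 2) N x ↔ pvReach M a N x) :
    ∀ (m : Nat) (x : Int), pvReach M (a + 2 * m) N x ↔ pvReach M a N x := by
  intro m
  induction m with
  | zero => intro x; rw [show a + 2 * 0 = a by ring]
  | succ m ih =>
    intro x
    rw [show a + 2 * (m + 1) = a + 2 * m + 2 by ring]
    rw [pvStabShift M N a h (2 * m) x]
    exact ih x

-- the while loop produces the levels 0..T, T ≤ K, stopping at K or a period-2 repeat -----

theorem pvHistGetLast (M N : Int) (t : Nat) :
    PySem.List.pyGetD ((List.range (t + 1)).map (pvLev M N)) (-1) PySem.Set.empty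
      = pvLev M N t := by
  rw [PySem.List.pyGetD_neg_ofNat _ 1 _ (by omega) (by simp)]
  simp

theorem pvHistGetThird (M N : Int) (t : Nat) (ht : 2 ≤ t) :
    PySem.List.pyGetD ((List.range (t + 1)).map (pvLev M N)) (-3) PySem.Set.empty
      = pvLev M N (t - 2) := by
  rw [PySem.List.pyGetD_neg_ofNat _ 3 _ (by omega) (by simp; omega)]
  simp

theorem pvHistGetSecond (M N : Int) (t : Nat) (ht : 1 ≤ t) :
    PySem.List.pyGetD ((List.range (t + 1)).map (pvLev M N)) (-2) PySem.Set.empty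
      = pvLev M N (t - 1) := by
  rw [PySem.List.pyGetD_neg_ofNat _ 2 _ (by omega) (by simp; omega)]
  simp

theorem pvLoopBRun (M N K : Int) (hK : 0 ≤ K) :
    ∀ (fuel t : Nat), (t : Int) ≤ K → K.toNat ≤ t + fuel →
      ∃ T : Nat, t ≤ T ∧ (T : Int) ≤ K
        ∧ loopB M K fuel ((List.range (t + 1)).map (pvLev M N))
            = (List.range (T + 1)).map (pvLev M N)
        ∧ ((T : Int) = K
            ∨ (2 ≤ T ∧ (T : Int) < K
               ∧ PySem.Set.equal (pvLev M N T) (pvLev M N (T - 2)) = true)) := by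
  intro fuel
  induction fuel with
  | zero =>
    intro t ht hf
    exact ⟨t, le_refl _, ht, rfl, Or.inl (by omega)⟩
  | succ f ih =>
    intro t ht hf
    have hlen : PySem.List.len ((List.range (t + 1)).map (pvLev M N)) = (t : Int) + 1 := by
      simp [PySem.List.len]
    rw [loopB]
    by_cases hcond : ((t : Int) + 1 ≤ K)
    · rw [if_pos (by rw [hlen]; exact hcond)]
      by_cases hstab : (3 ≤ PySem.List.len ((List.range (t + 1)).map (pvLev M N))
          ∧ PySem.Set.equal
              (PySem.List.pyGetD ((List.range (t + 1)).map (pvLev M N)) (-1) PySem.Set.empty)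
              (PySem.List.pyGetD ((List.range (t + 1)).map (pvLev M N)) (-3) PySem.Set.empty) = true)
      · rw [if_pos hstab]
        obtain ⟨h3, heq⟩ := hstab
        rw [hlen] at h3
        have ht2 : 2 ≤ t := by omega
        rw [pvHistGetLast, pvHistGetThird M N t ht2] at heq
        exact ⟨t, le_refl _, by omega, rfl, Or.inr ⟨ht2, by omega, heq⟩⟩
      · rw [if_neg hstab]
        have happ : (List.range (t + 1)).map (pvLev M N)
              ++ [stepB M (PySem.List.pyGetD ((List.range (t + 1)).map (pvLev M N)) (-1) PySem.Set.empty)]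
            = (List.range (t + 1 + 1)).map (pvLev M N) := by
          rw [pvHistGetLast]
          conv_rhs => rw [List.range_succ]
          rw [List.map_append]
          rfl
        rw [happ]
        obtain ⟨T, h1, h2, h3, h4⟩ := ih (t + 1) (by exact_mod_cast hcond) (by omega)
        exact ⟨T, by omega, h2, h3, h4⟩
    · rw [if_neg (by rw [hlen]; exact hcond)]
      exact ⟨t, le_refl _, ht, rfl, Or.inl (by omega)⟩

-- ===== VERDICT (by name: the statement is the Claim_ definition above) =====
theorem bfs_spec : Claim_equal_bfs := by
  intro N K _ hpre
  unfold Spec_bfs bfs bfs_alt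
  dsimp only
  have hK : ((K.toNat : Int)) = K := Int.toNat_of_nonneg hpre.2
  set M : Int := PySem.List.len (PySem.Int.toChars N) with hM
  -- A's loop value: the fold of max over the K-th level list
  have hq : ([(N, (0 : Int))] : List (Int × Int)) = [N].map (fun v => (v, K - (K.toNat : Int))) := by
    simp [hK]
  have hhigh : pvHighEmpty PySem.Set.empty (K - (K.toNat : Int)) := by
    intro w d _ h; cases h
  have hout := pvOuter M K K.toNat [N] 0 PySem.Set.empty 0 hhigh
  rw [show (0 + pvFuel M K.toNat [N] + 1) = pvFuel M K.toNat [N] + 1 by omega] at hout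
  have hmem := pvMemIter M K.toNat [N]
  -- B's loop: the history is the levels 0..T
  obtain ⟨T, hT0, hTK, hrun, hTcase⟩ :=
    pvLoopBRun M N K hpre.2 K.toNat 0 (by omega) (by omega)
  have hhist : loopB M K K.toNat [PySem.Set.ofList [N]] = (List.range (T + 1)).map (pvLev M N) := by
    rw [show ([PySem.Set.ofList [N]] : List (PySem.Set Int))
        = (List.range (0 + 1)).map (pvLev M N) from rfl]
    exact hrun
  rw [hhist]
  have hlen : PySem.List.len ((List.range (T + 1)).map (pvLev M N)) = (T : Int) + 1 := by
    simp [PySem.List.len]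
  set SA := iterLevelsB M K.toNat [N] with hSA
  set SB := (if K < PySem.List.len ((List.range (T + 1)).map (pvLev M N)) then
            PySem.List.pyGetD ((List.range (T + 1)).map (pvLev M N)) K PySem.Set.empty
          else if PySem.Int.mod (K - PySem.List.len ((List.range (T + 1)).map (pvLev M N)) + 1) 2 == 0 then
            PySem.List.pyGetD ((List.range (T + 1)).map (pvLev M N)) (-1) PySem.Set.empty
          else PySem.List.pyGetD ((List.range (T + 1)).map (pvLev M N)) (-2) PySem.Set.empty) with hSB
  -- the selected final set holds exactly the values reachable in exactly K swaps
  have hfinal : ∀ x, x ∈ SB ↔ pvReach M K.toNat N x := by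
    intro x
    rw [hSB]
    rcases hTcase with hTeq | ⟨hT2, hTlt, heq⟩
    · rw [if_pos (by rw [hlen]; omega)]
      have hKT : K = ((T : Nat) : Int) := hTeq.symm
      rw [hKT, PySem.List.pyGetD_natCast]
      have hTK' : K.toNat = T := by omega
      rw [List.getD_eq_getElem?_getD]
      simp only [List.getElem?_map]
      rw [List.getElem?_range (by omega)]
      simp only [Option.map_some, Option.getD_some]
      rw [Int.toNat_natCast]
      exact pvMemLev M N T x
    · rw [if_neg (by rw [hlen]; omega)]
      -- the period-2 repeat, as an equivalence of reachability predicates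
      have hbase : ∀ y, pvReach M ((T - 2) + 2) N y ↔ pvReach M (T - 2) N y := by
        intro y
        rw [show (T - 2) + 2 = T by omega]
        have h1 := (PySem.Set.equal_iff _ _).mp heq y
        rw [pvMemLev, pvMemLev] at h1
        exact h1
      rw [hlen]
      by_cases hpar : PySem.Int.mod (K - ((T : Int) + 1) + 1) 2 == 0
      · rw [if_pos hpar]
        rw [pvHistGetLast]
        have hdvd : (2 : Int) ∣ (K - T) := by
          have h2 : (2 : Int) ∣ (K - ((T : Int) + 1) + 1) := by
            simpa [PySem.Int.mod_eq_zero_iff_dvd] using hpar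
          omega
        obtain ⟨c, hc⟩ := hdvd
        have hc0 : 0 ≤ c := by omega
        have hKT : K.toNat = (T - 2) + 2 * (c.toNat + 1) := by omega
        rw [pvMemLev]
        rw [show pvReach M K.toNat N x ↔ pvReach M ((T - 2) + 2 * (c.toNat + 1)) N x from by rw [hKT]]
        rw [pvStabMany M N (T - 2) hbase (c.toNat + 1) x]
        rw [show (T - 2) + 2 = T from by omega] at hbase
        exact hbase x
      · rw [if_neg hpar]
        rw [pvHistGetSecond M N T (by omega)]
        have hndvd : ¬ (2 : Int) ∣ (K - T) := by
          intro hdvd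
          refine hpar ?_
          simp only [beq_iff_eq, PySem.Int.mod_eq_zero_iff_dvd]
          omega
        have hdvd' : (2 : Int) ∣ (K - ((T : Int) - 1)) := by omega
        obtain ⟨c, hc⟩ := hdvd'
        have hc0 : 0 ≤ c := by omega
        have hbase' : ∀ y, pvReach M ((T - 1) + 2) N y ↔ pvReach M (T - 1) N y := by
          have h1 := pvStabStep M N ((T - 2) + 2) (T - 2) hbase
          intro y
          rw [show (T - 1) + 2 = (T - 2) + 2 + 1 by omega, show T - 1 = (T - 2) + 1 by omega]
          exact h1 y
        have hKT : K.toNat = (T - 1) + 2 * c.toNat := by omega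
        rw [pvMemLev]
        rw [show pvReach M K.toNat N x ↔ pvReach M ((T - 1) + 2 * c.toNat) N x from by rw [hKT]]
        exact (pvStabMany M N (T - 1) hbase' c.toNat x).symm
  -- compare the two maxima over member-equal lists
  have hmemA : ∀ x, x ∈ SA ↔ pvReach M K.toNat N x := by
    intro x
    rw [hSA, hmem x]
    constructor
    · rintro ⟨v, hv, hr⟩
      rw [List.mem_singleton] at hv
      exact hv ▸ hr
    · intro hr
      exact ⟨N, List.mem_singleton.mpr rfl, hr⟩
  by_cases hSBnil : SB = []
  · have hSAnil : SA = [] := by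
      rw [List.eq_nil_iff_forall_not_mem]
      intro w hw
      have hr := (hmemA w).mp hw
      have h2 := (hfinal w).mpr hr
      rw [hSBnil] at h2
      cases h2
    rw [if_pos hSBnil]
    simp only [hq, hout, Option.getD_some, hSAnil, List.foldl_nil]
    decide
  · rw [if_neg hSBnil]
    cases hb : PySem.List.max? SB (fun x => x) with
    | none => exact absurd ((PySem.List.max?_eq_none_iff _ _).mp hb) hSBnil
    | some m =>
      have hmSB : m ∈ SB := PySem.List.max?_mem hb
      have hrm : pvReach M K.toNat N m := (hfinal m).mp hmSB
      have hm0 : 0 ≤ m := pvReachNonneg M K.toNat N m hpre.1 hrm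
      have hmSA : m ∈ SA := (hmemA m).mpr hrm
      have hub := PySem.List.le_foldl_max SA (0 : Int)
      have hle : m ≤ SA.foldl max 0 := hub.2 m hmSA
      have hge : SA.foldl max 0 ≤ m := by
        rcases PySem.List.foldl_max_mem SA (0 : Int) with h0 | hmemF
        · omega
        · have hr := (hmemA _).mp hmemF
          have hmemSB : SA.foldl max 0 ∈ SB := (hfinal _).mpr hr
          exact PySem.List.max?_isMax hb _ hmemSB
      have hFold : SA.foldl max 0 = m := le_antisymm hge hle
      simp only [hq, hout, Option.getD_some, hFold]
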